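-- pv_equiv track=rewrite | github.com/saimanoj0609/Chat_Bot_Model_v2 | parsed_Commands_Text_Fun.py | process_command_text
-- ===== SOURCE A (Python) =====
-- def process_command_text(text):
--     """
--     Converts a command block into structured fields.
--     """
--     field_map = {
--         "description": "description",
--         "synopsis": "syntax",
--         "input": "input",
--         "output": "output",
--         "example": "example"
--     }
--
--     result = {}
--     current_field = None
--     buffer = []
--
--     lines = text.strip().splitlines()
--     for line in lines:
--         line = line.strip()
--         if not line:
--             continue
--         matched = False
--         for key in field_map:
--             if line.lower().startswith(key):
--                 if current_field and buffer:
--                     result[field_map[current_field]] = '\n'.join(buffer).strip("● ").strip()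
--                 current_field = key
--                 content = line[len(key):].strip(":\t ")
--                 buffer = [content] if content else []
--                 matched = True
--                 break
--         if not matched:
--             buffer.append(line)
--
--     if current_field and buffer:
--         result[field_map[current_field]] = '\n'.join(buffer).strip("● ").strip()
--     return result
-- ===== SOURCE B (Python) =====
-- def process_command_text(text):
--     """
--     Converts a command block into structured fields.
--     """
--     field_map = {
--         "description": "description",
--         "synopsis": "syntax",
--         "input": "input",
--         "output": "output",
--         "example": "example"
--     }
--
--     # Walk the lines BACK-TO-FRONT: `tail` collects the body lines below the
--     # next header (in reverse); reaching a header line emits its complete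
--     # section at once, so no current-field state is carried forward.
--     sections = []
--     tail = []
--     for raw in reversed(text.strip().splitlines()):
--         line = raw.strip()
--         if not line:
--             continue
--         for key, name in field_map.items():
--             if line.lower().startswith(key):
--                 head = line[len(key):].strip(":\t ")
--                 content = ([head] if head else []) + tail[::-1]
--                 if content:
--                     sections.append((name, '\n'.join(content).strip("● ").strip()))
--                 tail = []
--                 break
--         else:
--             tail.append(line)
--     # lines left in `tail` precede every header and are discarded.
--
--     # sections is in reverse document order; dict() replays them in document
--     # order, so a later duplicate key overwrites an earlier one exactly as in
--     # a forward fill.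
--     return dict(reversed(sections))
-- ===== Notes on version B (the rewrite author's own statement) =====
-- stated objective: alternative
-- what changed: Replaces A's forward pass with mutable current_field/buffer state and incremental dict flushes by a back-to-front traversal: walking the lines in reverse, a tail buffer collects body lines and each header line emits its complete section immediately; the collected sections are then replayed in document order by a single dict() constructor.
import Mathlib
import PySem

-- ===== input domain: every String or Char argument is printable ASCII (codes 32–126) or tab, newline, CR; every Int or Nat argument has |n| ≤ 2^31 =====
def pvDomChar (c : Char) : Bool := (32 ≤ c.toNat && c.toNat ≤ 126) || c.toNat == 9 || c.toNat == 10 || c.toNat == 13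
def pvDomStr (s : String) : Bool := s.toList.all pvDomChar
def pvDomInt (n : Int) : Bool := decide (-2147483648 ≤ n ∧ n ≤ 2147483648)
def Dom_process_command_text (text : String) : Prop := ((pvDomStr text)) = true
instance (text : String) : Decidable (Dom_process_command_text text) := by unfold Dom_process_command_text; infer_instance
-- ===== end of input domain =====

-- B replaces A's forward pass (mutable current_field/buffer with incremental dict flushes) by a
-- back-to-front traversal that emits each complete section on reaching its header line and then
-- replays the sections in document order with one dict() constructor; objective: alternative.

-- ===== PORT A =====
-- field_map as a Python dict (A iterates its keys and looks up its values)
def pvFieldMapA : PySem.Dict String String :=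
  PySem.Dict.ofList [("description", "description"), ("synopsis", "syntax"),
    ("input", "input"), ("output", "output"), ("example", "example")]

-- '\n'.join(buffer).strip("● ").strip()
def pvJoinValA (buffer : List String) : String :=
  PySem.Str.strip (PySem.Str.stripChars (PySem.Str.join "\n" buffer) "● ")

-- the trailing "if current_field and buffer: result[field_map[current_field]] = …" flush
-- (current_field, being a field_map key, is a nonempty string, so Python's truthiness test
-- 'current_field and buffer' is 'current_field = some _ ∧ buffer ≠ []')
def pvFinish (st : PySem.Dict String String × Option String × List String) :
    PySem.Dict String String :=
  match st.2.1 with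
  | some cf => if st.2.2 ≠ [] then
      (st.1).insert (pvFieldMapA.getD cf "") (pvJoinValA st.2.2)
    else st.1
  | none => st.1

-- the body of A's 'for line in lines' loop; state = (result, current_field, buffer);
-- 'for key in field_map: if line.lower().startswith(key): … break' is the first matching key
def pvAStep (st : PySem.Dict String String × Option String × List String) (raw : String) :
    PySem.Dict String String × Option String × List String :=
  let line := PySem.Str.strip raw
  if line = "" then st
  else
    match pvFieldMapA.keys.find? (fun k => PySem.Str.startswith (PySem.Str.lower line) k) with
    | some key =>
        let result :=
          match st.2.1 with
          | some cf => if st.2.2 ≠ [] then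
                (st.1).insert (pvFieldMapA.getD cf "") (pvJoinValA st.2.2)
              else st.1
          | none => st.1
        let content := PySem.Str.stripChars (PySem.Str.slice line (some (PySem.Str.len key)) none) ":\t "
        (result, some key, if content ≠ "" then [content] else [])
    | none => (st.1, st.2.1, st.2.2 ++ [line])

def process_command_text (text : String) : List (String × String) :=
  let lines := PySem.Str.splitlines (PySem.Str.strip text)
  (pvFinish (lines.foldl pvAStep (PySem.Dict.empty, none, []))).items

-- ===== PORT B =====
-- field_map as B iterates it: (key, name) pairs, in order
def pvFieldListB : List (String × String) :=
  [("description", "description"), ("synopsis", "syntax"),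
   ("input", "input"), ("output", "output"), ("example", "example")]

-- the body of B's 'for raw in reversed(...)' loop; state = (sections, tail);
-- 'for key, name in field_map.items(): if …: … break / else: tail.append(line)'
def pvBStep (st : List (String × String) × List String) (raw : String) :
    List (String × String) × List String :=
  let line := PySem.Str.strip raw
  if line = "" then st
  else
    match pvFieldListB.find? (fun kv => PySem.Str.startswith (PySem.Str.lower line) kv.1) with
    | some kv =>
        let head := PySem.Str.stripChars (PySem.Str.slice line (some (PySem.Str.len kv.1)) none) ":\t "
        let content := (if head ≠ "" then [head] else []) ++ st.2.reverse
        ((if content ≠ [] then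
            st.1 ++ [(kv.2, PySem.Str.strip (PySem.Str.stripChars (PySem.Str.join "\n" content) "● "))]
          else st.1), [])
    | none => (st.1, st.2 ++ [line])

def process_command_text_alt (text : String) : List (String × String) :=
  let lines := PySem.Str.splitlines (PySem.Str.strip text)
  let st := lines.reverse.foldl pvBStep ([], [])
  (PySem.Dict.ofList st.1.reverse).items

-- ===== PRECONDITION & SPEC =====
def Spec_process_command_text (text : String) (out : List (String × String)) : Prop := out = process_command_text_alt text
instance (text : String) (out : List (String × String)) : Decidable (Spec_process_command_text text out) := by unfold Spec_process_command_text; infer_instance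

-- ===== CLAIM (what is proved, stated in full; the proofs are below) =====
def Claim_equal_process_command_text : Prop := ∀ (text : String), Dom_process_command_text text → Spec_process_command_text text (process_command_text text)

-- ===== LEMMAS AND PROOFS =====
-- the common header match and the content a matched header contributes (proof abbreviations)
def pvMatch (raw : String) : Option (String × String) :=
  pvFieldListB.find? (fun kv => PySem.Str.startswith (PySem.Str.lower (PySem.Str.strip raw)) kv.1)
def pvNewBuf (key raw : String) : List String :=
  let content := PySem.Str.stripChars (PySem.Str.slice (PySem.Str.strip raw) (some (PySem.Str.len key)) none) ":\t "
  if content ≠ "" then [content] else []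

-- proof-only intermediate: A's run grouped into (key, content-lines) segments in document order
def pvSegStep (segs : List (String × List String)) (raw : String) : List (String × List String) :=
  if PySem.Str.strip raw = "" then segs
  else
    match pvMatch raw with
    | some kv => segs ++ [(kv.1, pvNewBuf kv.1 raw)]
    | none =>
        match segs.getLast? with
        | some last => segs.dropLast ++ [(last.1, last.2 ++ [PySem.Str.strip raw])]
        | none => segs
def pvSegsOf (lines : List String) : List (String × List String) := lines.foldl pvSegStep []
def pvFlushStep (result : PySem.Dict String String) (seg : String × List String) :
    PySem.Dict String String :=
  if seg.2 ≠ [] then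
    result.insert ((pvFieldListB.lookup seg.1).getD "") (pvJoinValA seg.2)
  else result
-- the cleaned lines that precede the first header (absorbed by an open segment, else dropped)
def pvPre (lines : List String) : List String :=
  match lines with
  | [] => []
  | raw :: rest =>
    if PySem.Str.strip raw = "" then pvPre rest
    else match pvMatch raw with
      | some _ => []
      | none => PySem.Str.strip raw :: pvPre rest
-- the (name, value) pairs a segment list contributes, in order
def pvFlushList (segs : List (String × List String)) : List (String × String) :=
  segs.filterMap (fun s => if s.2 ≠ [] then
    some ((pvFieldListB.lookup s.1).getD "", pvJoinValA s.2) else none)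

theorem pvFlushList_cons_pos (s : String × List String) (rest : List (String × List String))
    (hc : s.2 ≠ []) : pvFlushList (s :: rest) =
      ((pvFieldListB.lookup s.1).getD "", pvJoinValA s.2) :: pvFlushList rest := by
  simp [pvFlushList, hc]
theorem pvFlushList_cons_neg (s : String × List String) (rest : List (String × List String))
    (hc : ¬ s.2 ≠ []) : pvFlushList (s :: rest) = pvFlushList rest := by
  simp only [not_not] at hc
  simp [pvFlushList, hc]

-- A's key iteration over field_map's keys = the iteration over the pair list
theorem pv_find_eq (p : String → Bool) :
    pvFieldMapA.keys.find? p = (pvFieldListB.find? (fun kv => p kv.1)).map Prod.fst := by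
  have h : pvFieldMapA.keys = pvFieldListB.map Prod.fst := by decide
  rw [h, List.find?_map]; rfl

-- one-step evaluation lemmas for the loop bodies
theorem pvAStep_skip (st : PySem.Dict String String × Option String × List String) (raw : String)
    (hline : PySem.Str.strip raw = "") : pvAStep st raw = st := by
  rw [pvAStep]; rw [if_pos hline]
theorem pvAStep_nomatch (d : PySem.Dict String String) (cf : Option String) (buf : List String)
    (raw : String) (hline : ¬ PySem.Str.strip raw = "") (hfind : pvMatch raw = none) :
    pvAStep (d, cf, buf) raw = (d, cf, buf ++ [PySem.Str.strip raw]) := by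
  rw [pvAStep]; rw [if_neg hline, pv_find_eq, pvMatch] at *; rw [hfind]; rfl
theorem pvAStep_match_some (d : PySem.Dict String String) (k : String) (buf : List String)
    (raw : String) (kv : String × String) (hline : ¬ PySem.Str.strip raw = "")
    (hfind : pvMatch raw = some kv) :
    pvAStep (d, some k, buf) raw =
      ((if buf ≠ [] then d.insert (pvFieldMapA.getD k "") (pvJoinValA buf) else d),
        some kv.1, pvNewBuf kv.1 raw) := by
  rw [pvAStep]; rw [if_neg hline, pv_find_eq, pvMatch] at *; rw [hfind]; rfl
theorem pvAStep_match_none (d : PySem.Dict String String) (buf : List String)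
    (raw : String) (kv : String × String) (hline : ¬ PySem.Str.strip raw = "")
    (hfind : pvMatch raw = some kv) :
    pvAStep (d, none, buf) raw = (d, some kv.1, pvNewBuf kv.1 raw) := by
  rw [pvAStep]; rw [if_neg hline, pv_find_eq, pvMatch] at *; rw [hfind]; rfl
theorem pvBStep_skip (st : List (String × String) × List String) (raw : String)
    (hline : PySem.Str.strip raw = "") : pvBStep st raw = st := by
  rw [pvBStep]; rw [if_pos hline]
theorem pvBStep_nomatch (S : List (String × String)) (T : List String) (raw : String)
    (hline : ¬ PySem.Str.strip raw = "") (hfind : pvMatch raw = none) :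
    pvBStep (S, T) raw = (S, T ++ [PySem.Str.strip raw]) := by
  rw [pvBStep]; rw [if_neg hline, pvMatch] at *; rw [hfind]
theorem pvBStep_match (S : List (String × String)) (T : List String) (raw : String)
    (kv : String × String) (hline : ¬ PySem.Str.strip raw = "") (hfind : pvMatch raw = some kv) :
    pvBStep (S, T) raw =
      ((if pvNewBuf kv.1 raw ++ T.reverse ≠ [] then
          S ++ [(kv.2, pvJoinValA (pvNewBuf kv.1 raw ++ T.reverse))] else S), []) := by
  rw [pvBStep]; rw [if_neg hline, pvMatch] at *; rw [hfind]
  simp only [pvNewBuf, pvJoinValA]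
theorem pvSegStep_skip (segs : List (String × List String)) (raw : String)
    (hline : PySem.Str.strip raw = "") : pvSegStep segs raw = segs := by
  rw [pvSegStep]; rw [if_pos hline]
theorem pvSegStep_match (segs : List (String × List String)) (raw : String) (kv : String × String)
    (hline : ¬ PySem.Str.strip raw = "") (hfind : pvMatch raw = some kv) :
    pvSegStep segs raw = segs ++ [(kv.1, pvNewBuf kv.1 raw)] := by
  rw [pvSegStep]; rw [if_neg hline]; rw [hfind]
theorem pvSegStep_nomatch_nil (raw : String)
    (hline : ¬ PySem.Str.strip raw = "") (hfind : pvMatch raw = none) :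
    pvSegStep [] raw = [] := by
  rw [pvSegStep]; rw [if_neg hline]; rw [hfind]; rfl
theorem pvSegStep_nomatch_one (k : String) (buf : List String) (raw : String)
    (hline : ¬ PySem.Str.strip raw = "") (hfind : pvMatch raw = none) :
    pvSegStep [(k, buf)] raw = [(k, buf ++ [PySem.Str.strip raw])] := by
  rw [pvSegStep]; rw [if_neg hline]; rw [hfind]; rfl

-- A's dict lookup of a field value = the association-list lookup
theorem pv_lookup_eq (c : String) :
    pvFieldMapA.getD c "" = (pvFieldListB.lookup c).getD "" := by
  have h : pvFieldMapA = PySem.Dict.mk pvFieldListB := by decide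
  rw [h]
  by_cases h1 : c = "description"
  · subst h1; decide
  by_cases h2 : c = "synopsis"
  · subst h2; decide
  by_cases h3 : c = "input"
  · subst h3; decide
  by_cases h4 : c = "output"
  · subst h4; decide
  by_cases h5 : c = "example"
  · subst h5; decide
  have g1 : ("description" == c) = false := beq_eq_false_iff_ne.mpr (fun h => h1 h.symm)
  have g2 : ("synopsis" == c) = false := beq_eq_false_iff_ne.mpr (fun h => h2 h.symm)
  have g3 : ("input" == c) = false := beq_eq_false_iff_ne.mpr (fun h => h3 h.symm)
  have g4 : ("output" == c) = false := beq_eq_false_iff_ne.mpr (fun h => h4 h.symm)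
  have g5 : ("example" == c) = false := beq_eq_false_iff_ne.mpr (fun h => h5 h.symm)
  have e1 : (c == "description") = false := beq_eq_false_iff_ne.mpr h1
  have e2 : (c == "synopsis") = false := beq_eq_false_iff_ne.mpr h2
  have e3 : (c == "input") = false := beq_eq_false_iff_ne.mpr h3
  have e4 : (c == "output") = false := beq_eq_false_iff_ne.mpr h4
  have e5 : (c == "example") = false := beq_eq_false_iff_ne.mpr h5
  simp [pvFieldListB, List.lookup, PySem.Dict.getD, PySem.Dict.get?,
    g1, g2, g3, g4, g5, e1, e2, e3, e4, e5]

-- A's incremental flush of a segment = the segment-list flush step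
theorem pv_flush_eq (d : PySem.Dict String String) (k : String) (buf : List String) :
    (if buf ≠ [] then d.insert (pvFieldMapA.getD k "") (pvJoinValA buf) else d) =
      pvFlushStep d (k, buf) := by
  rw [pvFlushStep, pv_lookup_eq]

-- a found pair's name is what looking its key up yields (keys of pvFieldListB are distinct)
theorem pv_found_lookup (p : String × String → Bool) (kv : String × String)
    (hfind : pvFieldListB.find? p = some kv) :
    (pvFieldListB.lookup kv.1).getD "" = kv.2 := by
  have hm : kv ∈ pvFieldListB := List.mem_of_find?_eq_some hfind
  fin_cases hm <;> decide

-- the segment fold never touches a nonempty prefix of the segment list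
theorem pv_seg_step_append (raw : String) (s t : List (String × List String)) (ht : t ≠ []) :
    pvSegStep (s ++ t) raw = s ++ pvSegStep t raw := by
  by_cases hline : PySem.Str.strip raw = ""
  · rw [pvSegStep_skip _ _ hline, pvSegStep_skip _ _ hline]
  cases hfind : pvMatch raw with
  | some kv => rw [pvSegStep_match _ _ _ hline hfind, pvSegStep_match _ _ _ hline hfind,
      List.append_assoc]
  | none =>
    rw [pvSegStep, pvSegStep]
    rw [if_neg hline, if_neg hline]
    rw [hfind]
    cases t with
    | nil => exact absurd rfl ht
    | cons a t' =>
      simp only [List.getLast?_append, List.dropLast_append]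
      cases hlast : (a :: t').getLast? with
      | none => simp at hlast
      | some last => simp [List.append_assoc]

theorem pv_seg_step_ne_nil (raw : String) (t : List (String × List String)) (ht : t ≠ []) :
    pvSegStep t raw ≠ [] := by
  by_cases hline : PySem.Str.strip raw = ""
  · rw [pvSegStep_skip _ _ hline]; exact ht
  cases hfind : pvMatch raw with
  | some kv => rw [pvSegStep_match _ _ _ hline hfind]; simp
  | none =>
    rw [pvSegStep]
    rw [if_neg hline]
    rw [hfind]
    cases hlast : t.getLast? with
    | none => simpa using (List.getLast?_eq_none_iff.mp hlast) ▸ ht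
    | some last => simp

theorem pv_seg_prefix (lines : List String) (s t : List (String × List String)) (ht : t ≠ []) :
    lines.foldl pvSegStep (s ++ t) = s ++ lines.foldl pvSegStep t := by
  induction lines generalizing t with
  | nil => rfl
  | cons raw rest ih =>
    simp only [List.foldl_cons]
    rw [pv_seg_step_append raw s t ht]
    exact ih _ (pv_seg_step_ne_nil raw t ht)

-- A's loop invariant: the run from an open field = flushing the segments from that open segment
theorem pv_main (lines : List String) (d : PySem.Dict String String) (k : String)
    (buf : List String) :
    pvFinish (lines.foldl pvAStep (d, some k, buf)) =
      (lines.foldl pvSegStep [(k, buf)]).foldl pvFlushStep d := by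
  induction lines generalizing d k buf with
  | nil =>
    show pvFinish (d, some k, buf) = pvFlushStep d (k, buf)
    rw [← pv_flush_eq]; rfl
  | cons raw rest ih =>
    simp only [List.foldl_cons]
    by_cases hline : PySem.Str.strip raw = ""
    · rw [pvAStep_skip _ _ hline, pvSegStep_skip _ _ hline]; exact ih d k buf
    cases hfind : pvMatch raw with
    | none =>
      rw [pvAStep_nomatch _ _ _ _ hline hfind, pvSegStep_nomatch_one _ _ _ hline hfind]
      exact ih d k _
    | some kv =>
      rw [pvAStep_match_some _ _ _ _ _ hline hfind, pvSegStep_match _ _ _ hline hfind,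
        pv_seg_prefix rest [(k, buf)] _ (by simp), List.singleton_append, List.foldl_cons,
        ih _ kv.1 _, pv_flush_eq]

-- A from the initial closed state = flushing the segment list (pre-header lines dropped)
theorem pv_start (lines : List String) (d : PySem.Dict String String) (buf : List String) :
    pvFinish (lines.foldl pvAStep (d, none, buf)) =
      (lines.foldl pvSegStep []).foldl pvFlushStep d := by
  induction lines generalizing buf with
  | nil => rfl
  | cons raw rest ih =>
    simp only [List.foldl_cons]
    by_cases hline : PySem.Str.strip raw = ""
    · rw [pvAStep_skip _ _ hline, pvSegStep_skip _ _ hline]; exact ih buf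
    cases hfind : pvMatch raw with
    | none =>
      rw [pvAStep_nomatch _ _ _ _ hline hfind, pvSegStep_nomatch_nil _ hline hfind]
      exact ih _
    | some kv =>
      rw [pvAStep_match_none _ _ _ _ hline hfind, pvSegStep_match _ _ _ hline hfind]
      exact pv_main rest d kv.1 _

-- an opened segment absorbs exactly the pre-header lines, then the remaining segments follow
theorem pv_seg_open (lines : List String) (k : String) (buf : List String) :
    lines.foldl pvSegStep [(k, buf)] = (k, buf ++ pvPre lines) :: pvSegsOf lines := by
  induction lines generalizing buf with
  | nil => simp [pvSegsOf, pvPre]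
  | cons raw rest ih =>
    simp only [List.foldl_cons]
    by_cases hline : PySem.Str.strip raw = ""
    · rw [pvSegStep_skip _ _ hline]
      have : pvSegsOf (raw :: rest) = pvSegsOf rest := by
        simp [pvSegsOf, pvSegStep_skip _ _ hline]
      rw [this, pvPre, if_pos hline]; exact ih buf
    cases hfind : pvMatch raw with
    | none =>
      rw [pvSegStep_nomatch_one _ _ _ hline hfind]
      have hs : pvSegsOf (raw :: rest) = pvSegsOf rest := by
        simp [pvSegsOf, pvSegStep_nomatch_nil _ hline hfind]
      rw [hs]
      have hp : pvPre (raw :: rest) = PySem.Str.strip raw :: pvPre rest := by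
        rw [pvPre, if_neg hline, hfind]
      rw [hp, ih (buf ++ [PySem.Str.strip raw]), List.append_assoc]; rfl
    | some kv =>
      rw [pvSegStep_match _ _ _ hline hfind]
      rw [pv_seg_prefix rest [(k, buf)] [(kv.1, pvNewBuf kv.1 raw)] (by simp)]
      have hs : pvSegsOf (raw :: rest) = rest.foldl pvSegStep [(kv.1, pvNewBuf kv.1 raw)] := by
        simp [pvSegsOf, pvSegStep_match _ _ _ hline hfind]
      have hp : pvPre (raw :: rest) = [] := by rw [pvPre, if_neg hline, hfind]
      rw [hs, hp]
      simp

set_option maxHeartbeats 1600000 in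
-- characterization of B's reverse fold: sections (reversed) = the flush list, tail (reversed) = pre-header lines
theorem pv_b_char (lines : List String) :
    (lines.foldr (fun raw st => pvBStep st raw) ([], [])).1.reverse
        = pvFlushList (pvSegsOf lines) ∧
    (lines.foldr (fun raw st => pvBStep st raw) ([], [])).2.reverse = pvPre lines := by
  induction lines with
  | nil => exact ⟨rfl, rfl⟩
  | cons raw rest ih =>
    obtain ⟨ihS, ihT⟩ := ih
    simp only [List.foldr_cons]
    set st := rest.foldr (fun raw st => pvBStep st raw) ([], []) with hst
    by_cases hline : PySem.Str.strip raw = ""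
    · have hs : pvSegsOf (raw :: rest) = pvSegsOf rest := by
        simp [pvSegsOf, pvSegStep_skip _ _ hline]
      have hp : pvPre (raw :: rest) = pvPre rest := by rw [pvPre, if_pos hline]
      rw [pvBStep_skip _ _ hline, hs, hp]; exact ⟨ihS, ihT⟩
    cases hfind : pvMatch raw with
    | none =>
      have hs : pvSegsOf (raw :: rest) = pvSegsOf rest := by
        simp [pvSegsOf, pvSegStep_nomatch_nil _ hline hfind]
      have hp : pvPre (raw :: rest) = PySem.Str.strip raw :: pvPre rest := by
        rw [pvPre, if_neg hline, hfind]
      rw [show st = (st.1, st.2) from rfl, pvBStep_nomatch _ _ _ hline hfind, hs, hp]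
      constructor
      · exact ihS
      · simp [ihT]
    | some kv =>
      have hs : pvSegsOf (raw :: rest) = (kv.1, pvNewBuf kv.1 raw ++ pvPre rest) :: pvSegsOf rest := by
        simp only [pvSegsOf, List.foldl_cons]
        rw [pvSegStep_match _ _ _ hline hfind, List.nil_append]
        exact pv_seg_open rest kv.1 _
      have hp : pvPre (raw :: rest) = [] := by rw [pvPre, if_neg hline, hfind]
      rw [show st = (st.1, st.2) from rfl, pvBStep_match _ _ _ _ hline hfind, hs, hp]
      rw [ihT]
      constructor
      · by_cases hc : pvNewBuf kv.1 raw ++ pvPre rest ≠ []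
        · rw [if_pos hc,
            pvFlushList_cons_pos (kv.1, pvNewBuf kv.1 raw ++ pvPre rest) (pvSegsOf rest) hc,
            pv_found_lookup _ kv hfind]
          simp [ihS]
        · rw [if_neg hc,
            pvFlushList_cons_neg (kv.1, pvNewBuf kv.1 raw ++ pvPre rest) (pvSegsOf rest) hc]
          exact ihS
      · rfl

-- flushing segments into a dict = inserting the flush list into it
theorem pv_flush_fold (segs : List (String × List String)) (d : PySem.Dict String String) :
    segs.foldl pvFlushStep d =
      (pvFlushList segs).foldl (fun d p => d.insert p.1 p.2) d := by
  induction segs generalizing d with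
  | nil => rfl
  | cons s rest ih =>
    rw [List.foldl_cons]
    by_cases hc : s.2 ≠ []
    · rw [pvFlushList_cons_pos s rest hc, List.foldl_cons, ih]
      congr 1
      rw [pvFlushStep, if_pos hc]
    · rw [pvFlushList_cons_neg s rest hc, ih]
      congr 1
      rw [pvFlushStep, if_neg hc]

-- ===== VERDICT (by name: the statement is the Claim_ definition above) =====
theorem process_command_text_spec : Claim_equal_process_command_text := by
  intro text _
  simp only [Spec_process_command_text, process_command_text, process_command_text_alt]
  rw [List.foldl_reverse]
  rw [(pv_b_char (PySem.Str.splitlines (PySem.Str.strip text))).1]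
  rw [pv_start _ PySem.Dict.empty []]
  rw [pv_flush_fold]
  rfl
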